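-- pv_equiv track=rewrite | github.com/purwowd/gmr-satphone-crypto | gmr2_cipher.py | _g_component
-- ===== SOURCE A (Python) =====
-- def _g_component(i0: int, i1: int, s0: int) -> tuple[int, int]:
--     """Linear G: 6-bit outputs (MSB = first bit in paper tuple)."""
--     ib = [(i0 >> i) & 1 for i in range(7, -1, -1)]
--     sb = [(s0 >> i) & 1 for i in range(7, -1, -1)]
--     i1b = [(i1 >> i) & 1 for i in range(3, -1, -1)]
--     I0 = ib
--     I1 = i1b
--     S0 = sb
--     b0 = I0[0] ^ I0[3] ^ S0[2]
--     b1 = I0[0] ^ I0[1] ^ I0[3] ^ S0[0]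
--     b2 = I0[0] ^ S0[3]
--     b3 = I0[2] ^ S0[1]
--     b4 = I1[0] ^ I1[2] ^ I1[3]
--     b5 = I1[0] ^ I1[3]
--     op0 = (b0 << 5) | (b1 << 4) | (b2 << 3) | (b3 << 2) | (b4 << 1) | b5
--     c0 = I0[4] ^ I0[7] ^ S0[6]
--     c1 = I0[4] ^ I0[5] ^ I0[7] ^ S0[4]
--     c2 = I0[4] ^ S0[7]
--     c3 = I0[6] ^ S0[5]
--     c4 = I1[1]
--     c5 = I1[3]
--     op1 = (c0 << 5) | (c1 << 4) | (c2 << 3) | (c3 << 2) | (c4 << 1) | c5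
--     return op0, op1
-- ===== SOURCE B (Python) =====
-- # Lookup-table G: the linear map splits into a shared 256-entry table for the
-- # (i0-nibble, s0-nibble) contribution and two 16-entry tables for i1; each
-- # output is the sum of two disjoint-bit table values.
--
-- def _build(gens):
--     # subset-sum table over GF(2): table[v] = XOR of gens[j] for set bits j of v
--     table = [0]
--     for g in gens:
--         table = table + [x ^ g for x in table]
--     return table
--
-- # contribution words of each index bit into a 6-bit output half
-- _T = _build([8, 32, 4, 16, 48, 4, 16, 56])   # index = (i0 nibble)*16 + (s0 nibble)
-- _TA = _build([3, 2, 0, 3])                   # i1 -> low two bits of op0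
-- _TB = _build([1, 0, 2, 0])                   # i1 -> low two bits of op1
--
-- def _g_component(i0: int, i1: int, s0: int) -> tuple[int, int]:
--     j = i1 % 16
--     op0 = _T[(i0 // 16 % 16) * 16 + (s0 // 16 % 16)] + _TA[j]
--     op1 = _T[(i0 % 16) * 16 + (s0 % 16)] + _TB[j]
--     return op0, op1
-- ===== Notes on version B (the rewrite author's own statement) =====
-- stated objective: alternative
-- what changed: B replaces A's per-output-bit XOR formulas over three unpacked bit-lists with precomputed lookup tables: a shared 256-entry subset-XOR table indexed by the (i0,s0) nibble pair gives the high four bits of each output half and two 16-entry tables give the i1 contribution, each output being the sum of two disjoint-bit table values.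
import Mathlib
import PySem

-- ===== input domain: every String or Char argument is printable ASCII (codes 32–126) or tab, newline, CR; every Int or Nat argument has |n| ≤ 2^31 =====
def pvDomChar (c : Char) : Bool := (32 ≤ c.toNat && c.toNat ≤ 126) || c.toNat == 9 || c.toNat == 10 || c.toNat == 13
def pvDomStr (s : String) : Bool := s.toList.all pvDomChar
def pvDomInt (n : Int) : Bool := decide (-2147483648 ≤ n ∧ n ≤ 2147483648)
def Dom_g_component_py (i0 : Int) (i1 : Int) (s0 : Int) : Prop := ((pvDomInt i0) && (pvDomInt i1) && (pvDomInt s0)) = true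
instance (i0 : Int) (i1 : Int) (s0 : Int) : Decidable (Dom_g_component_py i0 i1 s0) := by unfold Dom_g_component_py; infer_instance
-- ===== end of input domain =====

-- B computes G from precomputed subset-XOR lookup tables (one shared 256-entry
-- table for the (i0,s0) nibble pair, two 16-entry tables for i1) and sums the
-- disjoint-bit parts, instead of A's per-output-bit XOR formulas (alternative).

-- ===== PORT A =====
def g_component_py (i0 : Int) (i1 : Int) (s0 : Int) : Int × Int :=
  -- the comprehension index i runs over 7..0 (resp. 3..0), so i.toNat is exact
  let ib := (PySem.List.pyRange 7 (-1) (-1)).map (fun i => PySem.Int.band (i0 >>> i.toNat) 1)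
  let sb := (PySem.List.pyRange 7 (-1) (-1)).map (fun i => PySem.Int.band (s0 >>> i.toNat) 1)
  let i1b := (PySem.List.pyRange 3 (-1) (-1)).map (fun i => PySem.Int.band (i1 >>> i.toNat) 1)
  let I0 := ib
  let I1 := i1b
  let S0 := sb
  -- Python's constant in-range indexing I0[k]: pyGetD with default 0 (never used)
  let b0 := PySem.Int.bxor (PySem.Int.bxor (PySem.List.pyGetD I0 0 0) (PySem.List.pyGetD I0 3 0)) (PySem.List.pyGetD S0 2 0)
  let b1 := PySem.Int.bxor (PySem.Int.bxor (PySem.Int.bxor (PySem.List.pyGetD I0 0 0) (PySem.List.pyGetD I0 1 0)) (PySem.List.pyGetD I0 3 0)) (PySem.List.pyGetD S0 0 0)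
  let b2 := PySem.Int.bxor (PySem.List.pyGetD I0 0 0) (PySem.List.pyGetD S0 3 0)
  let b3 := PySem.Int.bxor (PySem.List.pyGetD I0 2 0) (PySem.List.pyGetD S0 1 0)
  let b4 := PySem.Int.bxor (PySem.Int.bxor (PySem.List.pyGetD I1 0 0) (PySem.List.pyGetD I1 2 0)) (PySem.List.pyGetD I1 3 0)
  let b5 := PySem.Int.bxor (PySem.List.pyGetD I1 0 0) (PySem.List.pyGetD I1 3 0)
  let op0 := PySem.Int.bor (PySem.Int.bor (PySem.Int.bor (PySem.Int.bor (PySem.Int.bor (b0 <<< 5) (b1 <<< 4)) (b2 <<< 3)) (b3 <<< 2)) (b4 <<< 1)) b5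
  let c0 := PySem.Int.bxor (PySem.Int.bxor (PySem.List.pyGetD I0 4 0) (PySem.List.pyGetD I0 7 0)) (PySem.List.pyGetD S0 6 0)
  let c1 := PySem.Int.bxor (PySem.Int.bxor (PySem.Int.bxor (PySem.List.pyGetD I0 4 0) (PySem.List.pyGetD I0 5 0)) (PySem.List.pyGetD I0 7 0)) (PySem.List.pyGetD S0 4 0)
  let c2 := PySem.Int.bxor (PySem.List.pyGetD I0 4 0) (PySem.List.pyGetD S0 7 0)
  let c3 := PySem.Int.bxor (PySem.List.pyGetD I0 6 0) (PySem.List.pyGetD S0 5 0)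
  let c4 := PySem.List.pyGetD I1 1 0
  let c5 := PySem.List.pyGetD I1 3 0
  let op1 := PySem.Int.bor (PySem.Int.bor (PySem.Int.bor (PySem.Int.bor (PySem.Int.bor (c0 <<< 5) (c1 <<< 4)) (c2 <<< 3)) (c3 <<< 2)) (c4 <<< 1)) c5
  (op0, op1)

-- ===== PORT B =====
-- Source B's _build: subset-XOR table, doubling once per generator
def gBuild (gens : List Int) : List Int :=
  gens.foldl (fun table g => table ++ table.map (fun x => PySem.Int.bxor x g)) [0]

def gT : List Int := gBuild [8, 32, 4, 16, 48, 4, 16, 56]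
def gTA : List Int := gBuild [3, 2, 0, 3]
def gTB : List Int := gBuild [1, 0, 2, 0]

def g_component_py_alt (i0 : Int) (i1 : Int) (s0 : Int) : Int × Int :=
  let j := PySem.Int.mod i1 16
  -- Python's list indexing here is always in range; pyGetD's default 0 is never used
  let op0 := PySem.List.pyGetD gT ((PySem.Int.mod (PySem.Int.floordiv i0 16) 16) * 16 + PySem.Int.mod (PySem.Int.floordiv s0 16) 16) 0
              + PySem.List.pyGetD gTA j 0
  let op1 := PySem.List.pyGetD gT ((PySem.Int.mod i0 16) * 16 + PySem.Int.mod s0 16) 0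
              + PySem.List.pyGetD gTB j 0
  (op0, op1)

-- ===== PRECONDITION & SPEC =====
def Spec_g_component_py (i0 : Int) (i1 : Int) (s0 : Int) (out : Int × Int) : Prop := out = g_component_py_alt i0 i1 s0
instance (i0 : Int) (i1 : Int) (s0 : Int) (out : Int × Int) : Decidable (Spec_g_component_py i0 i1 s0 out) := by unfold Spec_g_component_py; infer_instance

-- ===== CLAIM (what is proved, stated in full; the proofs are below) =====
def Claim_equal_g_component_py : Prop := ∀ (i0 : Int) (i1 : Int) (s0 : Int), Dom_g_component_py i0 i1 s0 → Spec_g_component_py i0 i1 s0 (g_component_py i0 i1 s0)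

-- ===== LEMMAS AND PROOFS =====
lemma shiftR_div_cast (a : Int) (k : Nat) : a >>> ((k : Nat) : Int) = a / 2 ^ k := by
  rw [Int.shiftRight_natCast_right, Int.shiftRight_eq_div_pow]; push_cast; ring_nf

lemma bxor_emod2 (a b : Int) : PySem.Int.bxor (a % 2) (b % 2) = (a + b) % 2 := by
  rcases Int.emod_two_eq a with h1 | h1 <;> rcases Int.emod_two_eq b with h2 | h2 <;>
    rw [h1, h2] <;>
    simp only [show PySem.Int.bxor 0 0 = 0 from by decide, show PySem.Int.bxor 0 1 = 1 from by decide,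
      show PySem.Int.bxor 1 0 = 1 from by decide, show PySem.Int.bxor 1 1 = 0 from by decide] <;>
    omega

lemma assemble6 (b0 b1 b2 b3 b4 b5 : Int)
    (h0 : b0 = 0 ∨ b0 = 1) (h1 : b1 = 0 ∨ b1 = 1) (h2 : b2 = 0 ∨ b2 = 1)
    (h3 : b3 = 0 ∨ b3 = 1) (h4 : b4 = 0 ∨ b4 = 1) (h5 : b5 = 0 ∨ b5 = 1) :
    PySem.Int.bor (PySem.Int.bor (PySem.Int.bor (PySem.Int.bor (PySem.Int.bor
      (b0 <<< 5) (b1 <<< 4)) (b2 <<< 3)) (b3 <<< 2)) (b4 <<< 1)) b5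
    = 32 * b0 + 16 * b1 + 8 * b2 + 4 * b3 + 2 * b4 + b5 := by
  rcases h0 with rfl | rfl <;> rcases h1 with rfl | rfl <;> rcases h2 with rfl | rfl <;>
    rcases h3 with rfl | rfl <;> rcases h4 with rfl | rfl <;> rcases h5 with rfl | rfl <;> decide

lemma assemble6' (a0 a1 a2 a3 a4 a5 : Int) :
    PySem.Int.bor (PySem.Int.bor (PySem.Int.bor (PySem.Int.bor (PySem.Int.bor
      ((a0 % 2) <<< 5) ((a1 % 2) <<< 4)) ((a2 % 2) <<< 3)) ((a3 % 2) <<< 2)) ((a4 % 2) <<< 1)) (a5 % 2)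
    = 32 * (a0 % 2) + 16 * (a1 % 2) + 8 * (a2 % 2) + 4 * (a3 % 2) + 2 * (a4 % 2) + (a5 % 2) :=
  assemble6 _ _ _ _ _ _ (Int.emod_two_eq _) (Int.emod_two_eq _) (Int.emod_two_eq _)
    (Int.emod_two_eq _) (Int.emod_two_eq _) (Int.emod_two_eq _)

-- A's value as plain div/mod arithmetic on the inputs
lemma A_eval (i0 i1 s0 : Int) : g_component_py i0 i1 s0 =
    (32 * ((i0/128 + i0/16 + s0/32) % 2) + 16 * ((i0/128 + i0/64 + i0/16 + s0/128) % 2)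
      + 8 * ((i0/128 + s0/16) % 2) + 4 * ((i0/32 + s0/64) % 2)
      + 2 * ((i1/8 + i1/2 + i1/1) % 2) + (i1/8 + i1/1) % 2,
     32 * ((i0/8 + i0/1 + s0/2) % 2) + 16 * ((i0/8 + i0/4 + i0/1 + s0/8) % 2)
      + 8 * ((i0/8 + s0/1) % 2) + 4 * ((i0/2 + s0/4) % 2)
      + 2 * ((i1/4) % 2) + (i1/1) % 2) := by
  show ((PySem.Int.bor (PySem.Int.bor (PySem.Int.bor (PySem.Int.bor (PySem.Int.bor ((PySem.Int.bxor (PySem.Int.bxor (PySem.Int.band (i0 >>> ((7:Nat):Int)) 1) (PySem.Int.band (i0 >>> ((4:Nat):Int)) 1)) (PySem.Int.band (s0 >>> ((5:Nat):Int)) 1)) <<< 5) ((PySem.Int.bxor (PySem.Int.bxor (PySem.Int.bxor (PySem.Int.band (i0 >>> ((7:Nat):Int)) 1) (PySem.Int.band (i0 >>> ((6:Nat):Int)) 1)) (PySem.Int.band (i0 >>> ((4:Nat):Int)) 1)) (PySem.Int.band (s0 >>> ((7:Nat):Int)) 1)) <<< 4)) ((PySem.Int.bxor (PySem.Int.band (i0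 >>> ((7:Nat):Int)) 1) (PySem.Int.band (s0 >>> ((4:Nat):Int)) 1)) <<< 3)) ((PySem.Int.bxor (PySem.Int.band (i0 >>> ((5:Nat):Int)) 1) (PySem.Int.band (s0 >>> ((6:Nat):Int)) 1)) <<< 2)) ((PySem.Int.bxor (PySem.Int.bxor (PySem.Int.band (i1 >>> ((3:Nat):Int)) 1) (PySem.Int.band (i1 >>> ((1:Nat):Int)) 1)) (PySem.Int.band (i1 >>> ((0:Nat):Int)) 1)) <<< 1)) (PySem.Int.bxor (PySem.Int.band (i1 >>> ((3:Nat):Int)) 1) (PySem.Int.band (i1 >>> ((0:Nat):Int)) 1))),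
    (PySem.Int.bor (PySem.Int.bor (PySem.Int.bor (PySem.Int.bor (PySem.Int.bor ((PySem.Int.bxor (PySem.Int.bxor (PySem.Int.band (i0 >>> ((3:Nat):Int)) 1) (PySem.Int.band (i0 >>> ((0:Nat):Int)) 1)) (PySem.Int.band (s0 >>> ((1:Nat):Int)) 1)) <<< 5) ((PySem.Int.bxor (PySem.Int.bxor (PySem.Int.bxor (PySem.Int.band (i0 >>> ((3:Nat):Int)) 1) (PySem.Int.band (i0 >>> ((2:Nat):Int)) 1)) (PySem.Int.band (i0 >>> ((0:Nat):Int)) 1)) (PySem.Int.band (s0 >>> ((3:Nat):Int)) 1)) <<< 4)) ((PySem.Int.bxor (PySem.Int.band (i0 >>> ((3:Nat):Int)) 1) (PySem.Int.band (s0 >>> ((0:Nat):Int)) 1)) <<< 3)) ((PySem.Int.bxor (PySem.Int.band (i0 >>> ((1:Nat):Int)) 1) (PySem.Int.band (s0 >>> ((2:Nat):Int)) 1)) <<< 2)) ((PySem.Int.band (i1 >>> ((2:Nat):Int)) 1) <<< 1)) (PySem.Int.band (i1 >>> ((0:Nat):Int)) 1)))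
    = _
  simp only [PySem.Int.band_one]
  simp only [PySem.Int.mod_eq_emod_of_pos (b := 2) (by norm_num)]
  simp only [shiftR_div_cast]
  norm_num only
  simp only [bxor_emod2]
  simp only [assemble6']

-- closed form of each table entry of gT: parities of the index bits feeding each output bit
set_option maxRecDepth 4000 in
lemma gT_entry_fin : ∀ v : Fin 256,
    PySem.List.pyGetD gT ((v : Nat) : Int) 0
      = 32 * ((((v:Nat):Int) / 128 + ((v:Nat):Int) / 16 + ((v:Nat):Int) / 2) % 2)
        + 16 * ((((v:Nat):Int) / 128 + ((v:Nat):Int) / 64 + ((v:Nat):Int) / 16 + ((v:Nat):Int) / 8) % 2)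
        + 8 * ((((v:Nat):Int) / 128 + ((v:Nat):Int)) % 2)
        + 4 * ((((v:Nat):Int) / 32 + ((v:Nat):Int) / 4) % 2) := by decide

lemma gTA_entry_fin : ∀ w : Fin 16,
    PySem.List.pyGetD gTA ((w : Nat) : Int) 0
      = 2 * ((((w:Nat):Int) / 8 + ((w:Nat):Int) / 2 + ((w:Nat):Int)) % 2)
        + (((w:Nat):Int) / 8 + ((w:Nat):Int)) % 2 := by decide

lemma gTB_entry_fin : ∀ w : Fin 16,
    PySem.List.pyGetD gTB ((w : Nat) : Int) 0
      = 2 * ((((w:Nat):Int) / 4) % 2) + ((w:Nat):Int) % 2 := by decide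

lemma gT_entry (x : Int) (h0 : 0 ≤ x) (h1 : x < 256) :
    PySem.List.pyGetD gT x 0
      = 32 * ((x/128 + x/16 + x/2) % 2) + 16 * ((x/128 + x/64 + x/16 + x/8) % 2)
        + 8 * ((x/128 + x) % 2) + 4 * ((x/32 + x/4) % 2) := by
  have h := gT_entry_fin ⟨x.toNat, by omega⟩
  simpa [Int.toNat_of_nonneg h0] using h

lemma gTA_entry (x : Int) (h0 : 0 ≤ x) (h1 : x < 16) :
    PySem.List.pyGetD gTA x 0 = 2 * ((x/8 + x/2 + x) % 2) + (x/8 + x) % 2 := by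
  have h := gTA_entry_fin ⟨x.toNat, by omega⟩
  simpa [Int.toNat_of_nonneg h0] using h

lemma gTB_entry (x : Int) (h0 : 0 ≤ x) (h1 : x < 16) :
    PySem.List.pyGetD gTB x 0 = 2 * ((x/4) % 2) + x % 2 := by
  have h := gTB_entry_fin ⟨x.toNat, by omega⟩
  simpa [Int.toNat_of_nonneg h0] using h

lemma pP1 (i0 s0 : Int) : ((i0 / 16 % 16 * 16 + s0 / 16 % 16) / 128 + (i0 / 16 % 16 * 16 + s0 / 16 % 16) / 16 + (i0 / 16 % 16 * 16 + s0 / 16 % 16) / 2) % 2 = (i0 / 128 + i0 / 16 + s0 / 32) % 2 := by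
  have h0 : (i0 / 16 % 16 * 16 + s0 / 16 % 16) / 128 % 2 = i0 / 128 % 2 := by omega
  have h1 : (i0 / 16 % 16 * 16 + s0 / 16 % 16) / 16 % 2 = i0 / 16 % 2 := by omega
  have h2 : (i0 / 16 % 16 * 16 + s0 / 16 % 16) / 2 % 2 = s0 / 32 % 2 := by omega
  omega

lemma pP2 (i0 s0 : Int) : ((i0 / 16 % 16 * 16 + s0 / 16 % 16) / 128 + (i0 / 16 % 16 * 16 + s0 / 16 % 16) / 64 + (i0 / 16 % 16 * 16 + s0 / 16 % 16) / 16 + (i0 / 16 % 16 * 16 + s0 / 16 % 16) / 8) % 2 = (i0 / 128 + i0 / 64 + i0 / 16 + s0 / 128) % 2 := by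
  have h0 : (i0 / 16 % 16 * 16 + s0 / 16 % 16) / 128 % 2 = i0 / 128 % 2 := by omega
  have h1 : (i0 / 16 % 16 * 16 + s0 / 16 % 16) / 64 % 2 = i0 / 64 % 2 := by omega
  have h2 : (i0 / 16 % 16 * 16 + s0 / 16 % 16) / 16 % 2 = i0 / 16 % 2 := by omega
  have h3 : (i0 / 16 % 16 * 16 + s0 / 16 % 16) / 8 % 2 = s0 / 128 % 2 := by omega
  omega

lemma pP3 (i0 s0 : Int) : ((i0 / 16 % 16 * 16 + s0 / 16 % 16) / 128 + (i0 / 16 % 16 * 16 + s0 / 16 % 16)) % 2 = (i0 / 128 + s0 / 16) % 2 := by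
  have h0 : (i0 / 16 % 16 * 16 + s0 / 16 % 16) / 128 % 2 = i0 / 128 % 2 := by omega
  have h1 : (i0 / 16 % 16 * 16 + s0 / 16 % 16) % 2 = s0 / 16 % 2 := by omega
  omega

lemma pP4 (i0 s0 : Int) : ((i0 / 16 % 16 * 16 + s0 / 16 % 16) / 32 + (i0 / 16 % 16 * 16 + s0 / 16 % 16) / 4) % 2 = (i0 / 32 + s0 / 64) % 2 := by
  have h0 : (i0 / 16 % 16 * 16 + s0 / 16 % 16) / 32 % 2 = i0 / 32 % 2 := by omega
  have h1 : (i0 / 16 % 16 * 16 + s0 / 16 % 16) / 4 % 2 = s0 / 64 % 2 := by omega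
  omega

lemma pP5 (i1 : Int) : ((i1 % 16) / 8 + (i1 % 16) / 2 + (i1 % 16)) % 2 = (i1 / 8 + i1 / 2 + i1 / 1) % 2 := by
  have h0 : (i1 % 16) / 8 % 2 = i1 / 8 % 2 := by omega
  have h1 : (i1 % 16) / 2 % 2 = i1 / 2 % 2 := by omega
  have h2 : (i1 % 16) % 2 = i1 / 1 % 2 := by omega
  omega

lemma pP6 (i1 : Int) : ((i1 % 16) / 8 + (i1 % 16)) % 2 = (i1 / 8 + i1 / 1) % 2 := by
  have h0 : (i1 % 16) / 8 % 2 = i1 / 8 % 2 := by omega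
  have h1 : (i1 % 16) % 2 = i1 / 1 % 2 := by omega
  omega

lemma pQ1 (i0 s0 : Int) : ((i0 % 16 * 16 + s0 % 16) / 128 + (i0 % 16 * 16 + s0 % 16) / 16 + (i0 % 16 * 16 + s0 % 16) / 2) % 2 = (i0 / 8 + i0 / 1 + s0 / 2) % 2 := by
  have h0 : (i0 % 16 * 16 + s0 % 16) / 128 % 2 = i0 / 8 % 2 := by omega
  have h1 : (i0 % 16 * 16 + s0 % 16) / 16 % 2 = i0 / 1 % 2 := by omega
  have h2 : (i0 % 16 * 16 + s0 % 16) / 2 % 2 = s0 / 2 % 2 := by omega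
  omega

lemma pQ2 (i0 s0 : Int) : ((i0 % 16 * 16 + s0 % 16) / 128 + (i0 % 16 * 16 + s0 % 16) / 64 + (i0 % 16 * 16 + s0 % 16) / 16 + (i0 % 16 * 16 + s0 % 16) / 8) % 2 = (i0 / 8 + i0 / 4 + i0 / 1 + s0 / 8) % 2 := by
  have h0 : (i0 % 16 * 16 + s0 % 16) / 128 % 2 = i0 / 8 % 2 := by omega
  have h1 : (i0 % 16 * 16 + s0 % 16) / 64 % 2 = i0 / 4 % 2 := by omega
  have h2 : (i0 % 16 * 16 + s0 % 16) / 16 % 2 = i0 / 1 % 2 := by omega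
  have h3 : (i0 % 16 * 16 + s0 % 16) / 8 % 2 = s0 / 8 % 2 := by omega
  omega

lemma pQ3 (i0 s0 : Int) : ((i0 % 16 * 16 + s0 % 16) / 128 + (i0 % 16 * 16 + s0 % 16)) % 2 = (i0 / 8 + s0 / 1) % 2 := by
  have h0 : (i0 % 16 * 16 + s0 % 16) / 128 % 2 = i0 / 8 % 2 := by omega
  have h1 : (i0 % 16 * 16 + s0 % 16) % 2 = s0 / 1 % 2 := by omega
  omega

lemma pQ4 (i0 s0 : Int) : ((i0 % 16 * 16 + s0 % 16) / 32 + (i0 % 16 * 16 + s0 % 16) / 4) % 2 = (i0 / 2 + s0 / 4) % 2 := by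
  have h0 : (i0 % 16 * 16 + s0 % 16) / 32 % 2 = i0 / 2 % 2 := by omega
  have h1 : (i0 % 16 * 16 + s0 % 16) / 4 % 2 = s0 / 4 % 2 := by omega
  omega

lemma pQ5 (i1 : Int) : ((i1 % 16) / 4) % 2 = (i1 / 4) % 2 := by
  have h0 : (i1 % 16) / 4 % 2 = i1 / 4 % 2 := by omega
  omega

lemma pQ6 (i1 : Int) : ((i1 % 16)) % 2 = (i1 / 1) % 2 := by
  have h0 : (i1 % 16) % 2 = i1 / 1 % 2 := by omega
  omega

-- B's value as plain div/mod arithmetic on the inputs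
lemma B_eval (i0 i1 s0 : Int) : g_component_py_alt i0 i1 s0 =
    (32 * ((i0/128 + i0/16 + s0/32) % 2) + 16 * ((i0/128 + i0/64 + i0/16 + s0/128) % 2)
      + 8 * ((i0/128 + s0/16) % 2) + 4 * ((i0/32 + s0/64) % 2)
      + 2 * ((i1/8 + i1/2 + i1/1) % 2) + (i1/8 + i1/1) % 2,
     32 * ((i0/8 + i0/1 + s0/2) % 2) + 16 * ((i0/8 + i0/4 + i0/1 + s0/8) % 2)
      + 8 * ((i0/8 + s0/1) % 2) + 4 * ((i0/2 + s0/4) % 2)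
      + 2 * ((i1/4) % 2) + (i1/1) % 2) := by
  unfold g_component_py_alt
  simp only [PySem.Int.mod_eq_emod_of_pos (b := 16) (by norm_num),
    PySem.Int.floordiv_eq_ediv_of_pos (b := 16) (by norm_num)]
  rw [gT_entry (i0 / 16 % 16 * 16 + s0 / 16 % 16) (by omega) (by omega),
      gT_entry (i0 % 16 * 16 + s0 % 16) (by omega) (by omega),
      gTA_entry (i1 % 16) (by omega) (by omega),
      gTB_entry (i1 % 16) (by omega) (by omega)]
  rw [pP1, pP2, pP3, pP4, pP5, pP6, pQ1, pQ2, pQ3, pQ4, pQ5, pQ6, Prod.mk.injEq]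
  exact ⟨by ring, by ring⟩

lemma main_eq (i0 i1 s0 : Int) : g_component_py i0 i1 s0 = g_component_py_alt i0 i1 s0 :=
  (A_eval i0 i1 s0).trans (B_eval i0 i1 s0).symm

-- ===== VERDICT (by name: the statement is the Claim_ definition above) =====
theorem g_component_py_spec : Claim_equal_g_component_py := by
  intro i0 i1 s0 _
  unfold Spec_g_component_py
  exact main_eq i0 i1 s0
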